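-- pv_equiv track=rewrite | github.com/Rudolph001/golf | models.py | _distribute_handicap_strokes
-- ===== SOURCE A (Python) =====
-- def _distribute_handicap_strokes(handicap):
--     """Distribute handicap strokes across holes based on hole difficulty"""
--     handicap_strokes = {}
--
--     # Sort holes by handicap rating (difficulty)
--     holes_by_difficulty = sorted(PINACLEPOINT_COURSE['holes'], key=lambda x: x['handicap'])
--
--     # Distribute strokes starting with most difficult holes
--     remaining_strokes = handicap
--     for hole in holes_by_difficulty:
--         if remaining_strokes > 0:
--             hole_number = hole['number']
--             handicap_strokes[hole_number] = 1
--             remaining_strokes -= 1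
--
--             # If handicap > 18, give second stroke to most difficult holes
--             if remaining_strokes > 0 and handicap > 18:
--                 handicap_strokes[hole_number] = 2
--                 remaining_strokes -= 1
--
--     return handicap_strokes
--
-- PINACLEPOINT_COURSE = {
--     'holes': [
--         # Front Nine - Par 35
--         {'number': 1, 'par': 4, 'yards': 369, 'meters': 337, 'handicap': 12},
--         {'number': 2, 'par': 4, 'yards': 340, 'meters': 311, 'handicap': 8},
--         {'number': 3, 'par': 4, 'yards': 457, 'meters': 418, 'handicap': 16},
--         {'number': 4, 'par': 4, 'yards': 439, 'meters': 401, 'handicap': 2},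
--         {'number': 5, 'par': 5, 'yards': 522, 'meters': 477, 'handicap': 18},
--         {'number': 6, 'par': 4, 'yards': 355, 'meters': 325, 'handicap': 10},
--         {'number': 7, 'par': 3, 'yards': 129, 'meters': 118, 'handicap': 14},
--         {'number': 8, 'par': 4, 'yards': 350, 'meters': 320, 'handicap': 6},
--         {'number': 9, 'par': 3, 'yards': 185, 'meters': 169, 'handicap': 4},
--         # Back Nine - Par 37
--         {'number': 10, 'par': 4, 'yards': 368, 'meters': 337, 'handicap': 11},
--         {'number': 11, 'par': 4, 'yards': 374, 'meters': 342, 'handicap': 13},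
--         {'number': 12, 'par': 4, 'yards': 375, 'meters': 343, 'handicap': 5},
--         {'number': 13, 'par': 3, 'yards': 133, 'meters': 122, 'handicap': 15},
--         {'number': 14, 'par': 4, 'yards': 408, 'meters': 373, 'handicap': 9},
--         {'number': 15, 'par': 4, 'yards': 356, 'meters': 326, 'handicap': 17},
--         {'number': 16, 'par': 5, 'yards': 579, 'meters': 529, 'handicap': 1},
--         {'number': 17, 'par': 3, 'yards': 226, 'meters': 207, 'handicap': 3},
--         {'number': 18, 'par': 5, 'yards': 495, 'meters': 453, 'handicap': 7},
--     ]
-- }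
-- ===== SOURCE B (Python) =====
-- def _distribute_handicap_strokes(handicap):
--     """Closed-form stroke distribution: the hole's rank by difficulty determines its strokes."""
--     order = [h['number'] for h in sorted(PINACLEPOINT_COURSE['holes'], key=lambda x: x['handicap'])]
--     if handicap > 18:
--         full = min(handicap // 2, 18)
--         strokes = {order[i]: 2 for i in range(full)}
--         if handicap % 2 == 1 and full < 18:
--             strokes[order[full]] = 1
--         return strokes
--     return {order[i]: 1 for i in range(min(max(handicap, 0), 18))}
--
-- PINACLEPOINT_COURSE = {
--     'holes': [
--         {'number': 1, 'par': 4, 'yards': 369, 'meters': 337, 'handicap': 12},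
--         {'number': 2, 'par': 4, 'yards': 340, 'meters': 311, 'handicap': 8},
--         {'number': 3, 'par': 4, 'yards': 457, 'meters': 418, 'handicap': 16},
--         {'number': 4, 'par': 4, 'yards': 439, 'meters': 401, 'handicap': 2},
--         {'number': 5, 'par': 5, 'yards': 522, 'meters': 477, 'handicap': 18},
--         {'number': 6, 'par': 4, 'yards': 355, 'meters': 325, 'handicap': 10},
--         {'number': 7, 'par': 3, 'yards': 129, 'meters': 118, 'handicap': 14},
--         {'number': 8, 'par': 4, 'yards': 350, 'meters': 320, 'handicap': 6},
--         {'number': 9, 'par': 3, 'yards': 185, 'meters': 169, 'handicap': 4},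
--         {'number': 10, 'par': 4, 'yards': 368, 'meters': 337, 'handicap': 11},
--         {'number': 11, 'par': 4, 'yards': 374, 'meters': 342, 'handicap': 13},
--         {'number': 12, 'par': 4, 'yards': 375, 'meters': 343, 'handicap': 5},
--         {'number': 13, 'par': 3, 'yards': 133, 'meters': 122, 'handicap': 15},
--         {'number': 14, 'par': 4, 'yards': 408, 'meters': 373, 'handicap': 9},
--         {'number': 15, 'par': 4, 'yards': 356, 'meters': 326, 'handicap': 17},
--         {'number': 16, 'par': 5, 'yards': 579, 'meters': 529, 'handicap': 1},
--         {'number': 17, 'par': 3, 'yards': 226, 'meters': 207, 'handicap': 3},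
--         {'number': 18, 'par': 5, 'yards': 495, 'meters': 453, 'handicap': 7},
--     ]
-- }
-- ===== Notes on version B (the rewrite author's own statement) =====
-- stated objective: simpler
-- what changed: Replaces A's stateful decrementing-counter loop over the sorted holes with a closed-form rule on each hole's difficulty rank: for handicap>18 the hardest min(handicap//2,18) holes get 2 plus one odd leftover stroke, otherwise the hardest min(handicap,18) holes get 1, emitted by a dict comprehension.
import Mathlib
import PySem

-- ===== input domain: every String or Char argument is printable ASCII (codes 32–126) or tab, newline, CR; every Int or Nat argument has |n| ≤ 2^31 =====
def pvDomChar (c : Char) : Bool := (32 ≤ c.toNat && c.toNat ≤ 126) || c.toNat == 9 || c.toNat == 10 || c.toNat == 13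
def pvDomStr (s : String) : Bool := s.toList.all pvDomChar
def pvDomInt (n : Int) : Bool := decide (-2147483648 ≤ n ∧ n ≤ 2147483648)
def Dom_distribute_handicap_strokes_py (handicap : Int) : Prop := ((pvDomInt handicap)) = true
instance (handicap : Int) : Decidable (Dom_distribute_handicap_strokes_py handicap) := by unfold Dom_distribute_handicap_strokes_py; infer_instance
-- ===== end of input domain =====

-- B replaces A's decrementing loop over the sorted holes by a closed-form rule on each hole's
-- difficulty rank (objective: simpler decomposition; same cost on this fixed 18-hole course).

-- ===== PORT A =====
-- each hole as (number, par, yards, meters, handicap)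
def pinaclepointHoles : List (Int × Int × Int × Int × Int) :=
  [(1, 4, 369, 337, 12), (2, 4, 340, 311, 8), (3, 4, 457, 418, 16),
   (4, 4, 439, 401, 2), (5, 5, 522, 477, 18), (6, 4, 355, 325, 10),
   (7, 3, 129, 118, 14), (8, 4, 350, 320, 6), (9, 3, 185, 169, 4),
   (10, 4, 368, 337, 11), (11, 4, 374, 342, 13), (12, 4, 375, 343, 5),
   (13, 3, 133, 122, 15), (14, 4, 408, 373, 9), (15, 4, 356, 326, 17),
   (16, 5, 579, 529, 1), (17, 3, 226, 207, 3), (18, 5, 495, 453, 7)]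

def distribute_handicap_strokes_py (handicap : Int) : List (Int × Int) :=
  let holes_by_difficulty := PySem.List.sorted pinaclepointHoles (fun x => x.2.2.2.2)
  let st := holes_by_difficulty.foldl
    (fun (st : PySem.Dict Int Int × Int) hole =>
      if st.2 > 0 then
        let hole_number := hole.1
        let d := st.1.insert hole_number 1
        let rem := st.2 - 1
        if rem > 0 ∧ handicap > 18 then (d.insert hole_number 2, rem - 1) else (d, rem)
      else st)
    (PySem.Dict.empty, handicap)
  st.1.items

-- ===== PORT B =====
def distribute_handicap_strokes_py_alt (handicap : Int) : List (Int × Int) :=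
  let order := (PySem.List.sorted pinaclepointHoles (fun x => x.2.2.2.2)).map (·.1)
  if handicap > 18 then
    let full := min (PySem.Int.floordiv handicap 2) 18
    -- order[i] is in range for every i produced by the ranges below (0 ≤ i ≤ full ≤ 18,
    -- order has 18 entries), so the default of pyGetD is never used
    let strokes := (PySem.List.pyRange 0 full 1).foldl
      (fun d i => d.insert (PySem.List.pyGetD order i 0) 2) PySem.Dict.empty
    let strokes := if PySem.Int.mod handicap 2 = 1 ∧ full < 18 then
        strokes.insert (PySem.List.pyGetD order full 0) 1
      else strokes
    strokes.items
  else
    ((PySem.List.pyRange 0 (min (max handicap 0) 18) 1).foldl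
      (fun d i => d.insert (PySem.List.pyGetD order i 0) 1) PySem.Dict.empty).items

-- ===== PRECONDITION & SPEC =====
def Spec_distribute_handicap_strokes_py (handicap : Int) (out : List (Int × Int)) : Prop := out = distribute_handicap_strokes_py_alt handicap
instance (handicap : Int) (out : List (Int × Int)) : Decidable (Spec_distribute_handicap_strokes_py handicap out) := by unfold Spec_distribute_handicap_strokes_py; infer_instance

-- ===== CLAIM (what is proved, stated in full; the proofs are below) =====
def Claim_equal_distribute_handicap_strokes_py : Prop := ∀ (handicap : Int), Dom_distribute_handicap_strokes_py handicap → Spec_distribute_handicap_strokes_py handicap (distribute_handicap_strokes_py handicap)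

-- ===== LEMMAS AND PROOFS =====

-- A's loop does nothing once remaining_strokes ≤ 0
theorem loopA_nonpos (handicap : Int) (l : List (Int × Int × Int × Int × Int))
    (st : PySem.Dict Int Int × Int) (h0 : st.2 ≤ 0) :
    l.foldl
      (fun (st : PySem.Dict Int Int × Int) hole =>
        if st.2 > 0 then
          let hole_number := hole.1
          let d := st.1.insert hole_number 1
          let rem := st.2 - 1
          if rem > 0 ∧ handicap > 18 then (d.insert hole_number 2, rem - 1) else (d, rem)
        else st)
      st = st := by
  induction l with
  | nil => rfl
  | cons x xs ih =>
    simp only [List.foldl_cons]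
    rw [if_neg (by omega)]
    exact ih

-- with handicap > 18 and enough remaining strokes, every hole gets both strokes
theorem loopA_big (handicap : Int) (hbig : 18 < handicap)
    (l : List (Int × Int × Int × Int × Int)) (d : PySem.Dict Int Int) (rem : Int)
    (h2 : 2 * (l.length : Int) ≤ rem) :
    l.foldl
      (fun (st : PySem.Dict Int Int × Int) hole =>
        if st.2 > 0 then
          let hole_number := hole.1
          let dd := st.1.insert hole_number 1
          let r := st.2 - 1
          if r > 0 ∧ handicap > 18 then (dd.insert hole_number 2, r - 1) else (dd, r)
        else st)
      (d, rem)
    = (l.foldl (fun d hole => (d.insert hole.1 1).insert hole.1 2) d, rem - 2 * l.length) := by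
  induction l generalizing d rem with
  | nil => simp
  | cons x xs ih =>
    simp only [List.length_cons] at h2
    push_cast at h2
    simp only [List.foldl_cons]
    rw [if_pos (by omega), if_pos ⟨by omega, hbig⟩, ih _ _ (by omega)]
    refine Prod.ext rfl ?_
    simp only [List.length_cons]
    push_cast
    ring

-- ===== VERDICT (by name: the statement is the Claim_ definition above) =====
theorem distribute_handicap_strokes_py_spec : Claim_equal_distribute_handicap_strokes_py := by
  intro h _
  unfold Spec_distribute_handicap_strokes_py
  rcases (by omega : h ≤ 0 ∨ 0 < h) with h0 | hpos
  · -- no strokes at all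
    have hm : min (max h 0) 18 = 0 := by omega
    simp only [distribute_handicap_strokes_py, distribute_handicap_strokes_py_alt]
    rw [loopA_nonpos h _ _ h0, if_neg (by omega), hm,
      PySem.List.pyRange_one_eq_nil (by omega)]
    rfl
  · have hlen : ((PySem.List.sorted pinaclepointHoles (fun x => x.2.2.2.2)).length : Int) = 18 := by decide
    rcases (by omega : h < 36 ∨ 36 ≤ h) with hlt | hge
    · -- finitely many cases, each closed by computation
      interval_cases h <;> decide
    · -- every hole gets two strokes
      have hfull : min (PySem.Int.floordiv h 2) 18 = 18 := by
        rw [PySem.Int.floordiv_eq_ediv_of_pos (by omega)]; omega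
      simp only [distribute_handicap_strokes_py, distribute_handicap_strokes_py_alt]
      rw [loopA_big h (by omega) _ _ _ (by rw [hlen]; push_cast; omega),
        if_pos (by omega : h > 18), hfull,
        if_neg (fun hc => by omega : ¬ (PySem.Int.mod h 2 = 1 ∧ (18:Int) < 18))]
      rfl
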